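-- pv_equiv track=rewrite | github.com/B2SIC/CodeStorage | Challenge/알고리즘먼데이/6회/7게임.py | seven_game
-- ===== SOURCE A (Python) =====
-- def seven_game(num):
--     num_list = []
--
--     while num != 0:
--         num_list.append(num % 10)
--         num //= 10
--
--     a = 0
--     for i in range(0, len(num_list), 2):
--         a += num_list[i]
--
--     for j in range(1, len(num_list), 2):
--         if num_list[j] != 0:
--             a *= num_list[j]
--
--     return a % 10
-- ===== SOURCE B (Python) =====
-- def seven_game(num):
--     s = 0
--     p = 1
--     i = 0
--     while num != 0:
--         d = num % 10
--         num //= 10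
--         if i % 2 == 0:
--             s += d
--         elif d != 0:
--             p *= d
--         i += 1
--     return (s * p) % 10
-- ===== Notes on version B (the rewrite author's own statement) =====
-- stated objective: alternative
-- what changed: B fuses A's three passes (build a digit list, then two strided index loops) into one digit-peeling loop that maintains a sum and a product accumulator and returns (s*p) % 10, never materialising the list.
import Mathlib
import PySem

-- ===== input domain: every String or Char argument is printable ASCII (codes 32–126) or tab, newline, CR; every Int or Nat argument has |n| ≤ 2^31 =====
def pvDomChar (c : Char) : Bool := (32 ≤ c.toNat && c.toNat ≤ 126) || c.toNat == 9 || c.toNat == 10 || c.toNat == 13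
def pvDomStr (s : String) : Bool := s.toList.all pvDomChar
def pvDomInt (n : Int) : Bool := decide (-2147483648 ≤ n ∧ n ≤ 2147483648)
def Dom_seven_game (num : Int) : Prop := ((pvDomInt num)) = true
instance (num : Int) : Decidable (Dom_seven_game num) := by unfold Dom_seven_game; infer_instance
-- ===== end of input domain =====

-- B fuses A's three passes (digit list + two strided index loops) into one digit-peeling
-- loop with a sum and a product accumulator; same values, no asymptotic change (objective: alternative).

-- termination measure fact for the two digit-peeling loops (cited by name in decreasing_by)
lemma pvFloordiv10_toNat_lt (num : Int) (h : 0 < num) :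
    (PySem.Int.floordiv num 10).toNat < num.toNat := by
  rw [PySem.Int.floordiv_eq_ediv_of_pos (by omega : (0:Int) < 10)]
  omega

-- ===== PORT A =====
-- A's `while num != 0` loop building num_list. The guard `0 < num` coincides with
-- Python's `num != 0` for num ≥ 0; for num < 0 BOTH Pythons' loops never terminate
-- (num //= 10 stalls at -1), so no return value is claimed there and the ports
-- simply stop peeling (both use the same guard).
def sevenDigitsA (num : Int) : List Int :=
  if _h : 0 < num then
    PySem.Int.mod num 10 :: sevenDigitsA (PySem.Int.floordiv num 10)
  else []
termination_by num.toNat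
decreasing_by
  exact pvFloordiv10_toNat_lt num _h

def seven_game (num : Int) : Int :=
  let nl := sevenDigitsA num
  let a1 := (PySem.List.pyRange 0 (nl.length : Int) 2).foldl
              (fun a i => a + PySem.List.pyGetD nl i 0) 0
  let a2 := (PySem.List.pyRange 1 (nl.length : Int) 2).foldl
              (fun a j => if PySem.List.pyGetD nl j 0 ≠ 0 then a * PySem.List.pyGetD nl j 0 else a) a1
  PySem.Int.mod a2 10

-- ===== PORT B =====
-- B's single `while num != 0` loop (same guard remark as in port A).
def sevenLoopB (num i s p : Int) : Int × Int :=
  if h : 0 < num then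
    let d := PySem.Int.mod num 10
    if PySem.Int.mod i 2 = 0 then
      sevenLoopB (PySem.Int.floordiv num 10) (i + 1) (s + d) p
    else if d ≠ 0 then
      sevenLoopB (PySem.Int.floordiv num 10) (i + 1) s (p * d)
    else
      sevenLoopB (PySem.Int.floordiv num 10) (i + 1) s p
  else (s, p)
termination_by num.toNat
decreasing_by
  all_goals exact pvFloordiv10_toNat_lt num h

def seven_game_alt (num : Int) : Int :=
  let r := sevenLoopB num 0 0 1
  PySem.Int.mod (r.1 * r.2) 10

-- ===== PRECONDITION & SPEC =====
def Spec_seven_game (num : Int) (out : Int) : Prop := out = seven_game_alt num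
instance (num : Int) (out : Int) : Decidable (Spec_seven_game num out) := by unfold Spec_seven_game; infer_instance

-- ===== CLAIM (what is proved, stated in full; the proofs are below) =====
def Claim_equal_seven_game : Prop := ∀ (num : Int), Dom_seven_game num → Spec_seven_game num (seven_game num)

-- ===== LEMMAS AND PROOFS =====

-- (sum of digits at even indices, sum at odd indices)
def sumEO : List Int → Int × Int
  | [] => (0, 0)
  | d :: l => (d + (sumEO l).2, (sumEO l).1)

-- (product of the nonzero digits at even indices, same at odd indices)
def prodEO : List Int → Int × Int
  | [] => (1, 1)
  | d :: l => (if d ≠ 0 then d * (prodEO l).2 else (prodEO l).2, (prodEO l).1)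

-- range(a,b,2) over a cons shifts to range(a-1,b-1,2) over the tail
lemma shift2 (a b : Int) :
    PySem.List.pyRange a b 2 = (PySem.List.pyRange (a - 1) (b - 1) 2).map (· + 1) := by
  rw [PySem.List.pyRange_of_pos _ _ (by omega), PySem.List.pyRange_of_pos _ _ (by omega),
    List.map_map]
  have : (if a < b then ((b - a + 2 - 1) / 2).toNat else 0)
       = (if a - 1 < b - 1 then ((b - 1 - (a - 1) + 2 - 1) / 2).toNat else 0) := by
    split_ifs <;> omega
  rw [this]
  apply List.map_congr_left
  intro k _
  simp; omega

lemma pyRange2_cons (a b : Int) (h : a < b) :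
    PySem.List.pyRange a b 2 = a :: PySem.List.pyRange (a + 2) b 2 := by
  rw [PySem.List.pyRange_of_pos _ _ (by omega : (0:Int) < 2),
      PySem.List.pyRange_of_pos _ _ (by omega : (0:Int) < 2)]
  have h1 : (if a < b then ((b - a + 2 - 1) / 2).toNat else 0)
      = (if a + 2 < b then ((b - (a + 2) + 2 - 1) / 2).toNat else 0) + 1 := by
    split_ifs <;> omega
  rw [h1, List.range_succ_eq_map, List.map_cons, List.map_map]
  congr 1
  · omega
  · apply List.map_congr_left; intro k _; simp; omega

lemma pyGetD_cons_shift (d : Int) (l : List Int) (i : Int) (hi : 0 ≤ i) :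
    PySem.List.pyGetD (d :: l) (i + 1) 0 = PySem.List.pyGetD l i 0 := by
  simp only [PySem.List.pyGetD, PySem.List.pyGet?, PySem.List.pyIdx?, List.length_cons]
  rw [if_pos (by omega : (0:Int) ≤ i + 1), if_pos hi]
  by_cases h : i < (l.length : Int)
  · rw [if_pos (by omega), if_pos (by omega)]
    have : (i + 1).toNat = i.toNat + 1 := by omega
    simp [this]
  · rw [if_neg (by omega), if_neg (by omega)]
    simp

-- fold of a {0,1}-started step-2 range accessing (d :: l) = the same fold one step over, accessing l
lemma fold_shift {β : Type} (g : β → Int → β) (d : Int) (l : List Int) (a b : Int)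
    (ha : 1 ≤ a) (acc : β) :
    (PySem.List.pyRange a b 2).foldl (fun x i => g x (PySem.List.pyGetD (d :: l) i 0)) acc
      = (PySem.List.pyRange (a - 1) (b - 1) 2).foldl (fun x i => g x (PySem.List.pyGetD l i 0)) acc := by
  rw [shift2 a b, List.foldl_map]
  apply PySem.List.foldl_congr_mem
  intro x i hi
  have hmem := (PySem.List.mem_pyRange_iff_of_pos (by omega : (0:Int) < 2) i).1 hi
  rw [pyGetD_cons_shift d l i (by omega)]

lemma sum_fold (l : List Int) : ∀ acc : Int,
    ((PySem.List.pyRange 0 (l.length : Int) 2).foldl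
        (fun a i => a + PySem.List.pyGetD l i 0) acc = acc + (sumEO l).1)
  ∧ ((PySem.List.pyRange 1 (l.length : Int) 2).foldl
        (fun a i => a + PySem.List.pyGetD l i 0) acc = acc + (sumEO l).2) := by
  induction l with
  | nil =>
      intro acc
      constructor <;> simp [PySem.List.pyRange_of_pos, sumEO]
  | cons d l ih =>
      intro acc
      have hlen : ((d :: l).length : Int) = (l.length : Int) + 1 := by simp
      constructor
      · rw [hlen, pyRange2_cons 0 _ (by omega), List.foldl_cons]
        have h0 : PySem.List.pyGetD (d :: l) 0 0 = d := by
          simp [PySem.List.pyGetD, PySem.List.pyGet?, PySem.List.pyIdx?]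
        have e02 : (0 : Int) + 2 = 2 := by norm_num
        rw [h0, e02]
        have := fold_shift (fun x y => x + y) d l 2 ((l.length : Int) + 1) (by omega) (acc + d)
        simp only at this
        rw [this]
        have h2 : (2 : Int) - 1 = 1 := by omega
        have h3 : (l.length : Int) + 1 - 1 = (l.length : Int) := by omega
        rw [h2, h3, (ih (acc + d)).2]
        simp [sumEO]; ring
      · rw [hlen]
        have := fold_shift (fun x y => x + y) d l 1 ((l.length : Int) + 1) (by omega) acc
        simp only at this
        rw [this]
        have h3 : (l.length : Int) + 1 - 1 = (l.length : Int) := by omega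
        have h2 : (1 : Int) - 1 = 0 := by omega
        rw [h2, h3, (ih acc).1]
        simp [sumEO]

lemma prod_fold (l : List Int) : ∀ acc : Int,
    ((PySem.List.pyRange 0 (l.length : Int) 2).foldl
        (fun a j => if PySem.List.pyGetD l j 0 ≠ 0 then a * PySem.List.pyGetD l j 0 else a) acc
      = acc * (prodEO l).1)
  ∧ ((PySem.List.pyRange 1 (l.length : Int) 2).foldl
        (fun a j => if PySem.List.pyGetD l j 0 ≠ 0 then a * PySem.List.pyGetD l j 0 else a) acc
      = acc * (prodEO l).2) := by
  induction l with
  | nil =>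
      intro acc
      constructor <;> simp [PySem.List.pyRange_of_pos, prodEO]
  | cons d l ih =>
      intro acc
      have hlen : ((d :: l).length : Int) = (l.length : Int) + 1 := by simp
      constructor
      · rw [hlen, pyRange2_cons 0 _ (by omega), List.foldl_cons]
        have h0 : PySem.List.pyGetD (d :: l) 0 0 = d := by
          simp [PySem.List.pyGetD, PySem.List.pyGet?, PySem.List.pyIdx?]
        have e02 : (0 : Int) + 2 = 2 := by norm_num
        rw [h0, e02]
        have := fold_shift (fun x y => if y ≠ 0 then x * y else x) d l 2 ((l.length : Int) + 1)
          (by omega) (if d ≠ 0 then acc * d else acc)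
        simp only at this
        rw [this]
        have h2 : (2 : Int) - 1 = 1 := by omega
        have h3 : (l.length : Int) + 1 - 1 = (l.length : Int) := by omega
        rw [h2, h3, (ih (if d ≠ 0 then acc * d else acc)).2]
        simp only [prodEO]
        split_ifs <;> ring
      · rw [hlen]
        have := fold_shift (fun x y => if y ≠ 0 then x * y else x) d l 1 ((l.length : Int) + 1)
          (by omega) acc
        simp only at this
        rw [this]
        have h3 : (l.length : Int) + 1 - 1 = (l.length : Int) := by omega
        have h2 : (1 : Int) - 1 = 0 := by omega
        rw [h2, h3, (ih acc).1]
        simp [prodEO]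

-- B's loop, characterised through the digit list of its argument
lemma sevenLoopB_spec (num : Int) : ∀ i s p : Int,
    sevenLoopB num i s p =
      (if PySem.Int.mod i 2 = 0
        then (s + (sumEO (sevenDigitsA num)).1, p * (prodEO (sevenDigitsA num)).2)
        else (s + (sumEO (sevenDigitsA num)).2, p * (prodEO (sevenDigitsA num)).1)) := by
  induction num using sevenDigitsA.induct with
  | case1 num h ih =>
      intro i s p
      rw [sevenLoopB, sevenDigitsA]
      simp only [dif_pos h]
      have hmod1 : PySem.Int.mod (i + 1) 2 = (if PySem.Int.mod i 2 = 0 then 1 else 0) := by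
        have e1 : PySem.Int.mod i 2 = i % 2 := PySem.Int.mod_eq_emod_of_pos (by omega)
        have e2 : PySem.Int.mod (i + 1) 2 = (i + 1) % 2 := PySem.Int.mod_eq_emod_of_pos (by omega)
        rw [e1, e2]
        split_ifs with hc <;> omega
      rcases PySem.Int.mod_two_eq i with h0 | h1
      · have hm1 : PySem.Int.mod (i + 1) 2 = 1 := by rw [hmod1, if_pos h0]
        simp only [if_pos h0, ih, hm1]
        rw [if_neg (by norm_num : ¬ (1 : Int) = 0)]
        simp only [sumEO, prodEO, Prod.mk.injEq]
        constructor <;> first | rfl | trivial | ring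
      · have hne : ¬ PySem.Int.mod i 2 = 0 := by rw [h1]; norm_num
        have hm0 : PySem.Int.mod (i + 1) 2 = 0 := by rw [hmod1, if_neg hne]
        simp only [if_neg hne, ih, hm0]
        by_cases hd : PySem.Int.mod num 10 = 0
        · simp only [hd, ne_eq, not_true_eq_false, if_false, sumEO, prodEO]
          constructor
        · simp only [ne_eq, hd, not_false_eq_true, if_true, sumEO, prodEO, Prod.mk.injEq]
          constructor <;> first | rfl | trivial | ring
  | case2 num h =>
      intro i s p
      rw [sevenLoopB, sevenDigitsA]
      simp only [dif_neg h]
      split_ifs <;> simp [sumEO, prodEO]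

-- ===== VERDICT (by name: the statement is the Claim_ definition above) =====
theorem seven_game_spec : Claim_equal_seven_game := by
  intro num _
  unfold Spec_seven_game seven_game seven_game_alt
  simp only []
  rw [(sum_fold (sevenDigitsA num) 0).1,
      (prod_fold (sevenDigitsA num) ((0 : Int) + (sumEO (sevenDigitsA num)).1)).2,
      sevenLoopB_spec num 0 0 1]
  have h0 : PySem.Int.mod (0 : Int) 2 = 0 := by decide
  rw [if_pos h0]
  ring_nf
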